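-- pv_equiv track=rewrite | github.com/CaiJingLong/marscode_prompt | 032_partition_by_last_digit.py | solution
-- ===== SOURCE A (Python) =====
-- from itertools import combinations
--
-- def solution(n, A, B, array_a):
--     total_ways = 0
--     total_sum = sum(array_a)
--
--     # 遍历所有可能的子集
--     for i in range(len(array_a) + 1):
--         for subset in combinations(array_a, i):
--             subset_sum = sum(subset)
--             other_sum = total_sum - subset_sum
--
--             # 检查是否满足条件
--             if (subset_sum % 10 == A and other_sum % 10 == B) or \
--                (subset_sum % 10 == B and other_sum % 10 == A):
--                 total_ways += 1
--
--     # 特殊情况：其中一组为空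
--     if total_sum % 10 == A or total_sum % 10 == B:
--         total_ways += 1
--
--     return total_ways
-- ===== SOURCE B (Python) =====
-- def solution(n, A, B, array_a):
--     total_sum = sum(array_a)
--     # dp[r] = number of subsets of array_a whose sum is congruent to r mod 10
--     dp = [0] * 10
--     dp[0] = 1
--     for x in array_a:
--         dp = [dp[r] + dp[(r - x) % 10] for r in range(10)]
--     total_ways = sum(dp[r] for r in range(10)
--                      if (r == A and (total_sum - r) % 10 == B) or
--                         (r == B and (total_sum - r) % 10 == A))
--     if total_sum % 10 == A or total_sum % 10 == B:
--         total_ways += 1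
--     return total_ways
-- ===== Notes on version B (the rewrite author's own statement) =====
-- stated objective: faster
-- what changed: replaces the exponential enumeration of all subsets via itertools.combinations with a residue-class dynamic program that counts subsets per sum mod 10 in one pass, then applies the same condition per residue
import Mathlib
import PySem

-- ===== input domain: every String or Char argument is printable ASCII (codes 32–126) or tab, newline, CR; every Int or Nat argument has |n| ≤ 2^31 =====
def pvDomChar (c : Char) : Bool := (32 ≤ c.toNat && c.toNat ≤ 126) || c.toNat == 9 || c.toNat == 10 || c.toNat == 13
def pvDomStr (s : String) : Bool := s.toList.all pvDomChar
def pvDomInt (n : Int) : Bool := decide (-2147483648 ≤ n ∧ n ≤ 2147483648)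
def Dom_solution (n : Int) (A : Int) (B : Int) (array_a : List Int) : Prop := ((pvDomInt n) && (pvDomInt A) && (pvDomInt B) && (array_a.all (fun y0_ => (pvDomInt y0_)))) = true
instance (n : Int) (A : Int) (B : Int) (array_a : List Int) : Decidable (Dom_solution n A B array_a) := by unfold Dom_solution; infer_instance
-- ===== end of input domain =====

-- B replaces A's exponential enumeration of all subsets with a residue-class DP
-- (counts of subsets per sum mod 10), applying the same condition per residue: faster.

-- ===== PORT A =====
def solution (n : Int) (A : Int) (B : Int) (array_a : List Int) : Int :=
  let total_sum := array_a.sum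
  let total_ways :=
    (PySem.List.pyRange 0 ((array_a.length : Int) + 1) 1).foldl (fun acc i =>
      (PySem.List.combinations array_a i.toNat).foldl (fun acc2 subset =>
        let subset_sum := subset.sum
        let other_sum := total_sum - subset_sum
        if (PySem.Int.mod subset_sum 10 == A && PySem.Int.mod other_sum 10 == B) ||
           (PySem.Int.mod subset_sum 10 == B && PySem.Int.mod other_sum 10 == A)
        then acc2 + 1 else acc2) acc) 0
  if PySem.Int.mod total_sum 10 == A || PySem.Int.mod total_sum 10 == B
  then total_ways + 1 else total_ways

-- ===== PORT B =====
def solution_alt (n : Int) (A : Int) (B : Int) (array_a : List Int) : Int :=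
  let total_sum := array_a.sum
  -- dp = [0]*10; dp[0] = 1
  let dp0 : List Int := (List.range 10).map (fun r => if r = 0 then 1 else 0)
  -- for x in array_a: dp = [dp[r] + dp[(r - x) % 10] for r in range(10)]
  let dp := array_a.foldl (fun dp x =>
      (List.range 10).map (fun r =>
        dp.getD r 0 + dp.getD (PySem.Int.mod ((r : Int) - x) 10).toNat 0)) dp0
  let total_ways := (List.range 10).foldl (fun (acc : Int) (r : Nat) =>
      if ((r : Int) == A && PySem.Int.mod (total_sum - (r : Int)) 10 == B) ||
         ((r : Int) == B && PySem.Int.mod (total_sum - (r : Int)) 10 == A)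
      then acc + dp.getD r 0 else acc) 0
  if PySem.Int.mod total_sum 10 == A || PySem.Int.mod total_sum 10 == B
  then total_ways + 1 else total_ways

-- ===== PRECONDITION & SPEC =====
def Spec_solution (n : Int) (A : Int) (B : Int) (array_a : List Int) (out : Int) : Prop := out = solution_alt n A B array_a
instance (n : Int) (A : Int) (B : Int) (array_a : List Int) (out : Int) : Decidable (Spec_solution n A B array_a out) := by unfold Spec_solution; infer_instance

-- ===== CLAIM (what is proved, stated in full; the proofs are below) =====
def Claim_equal_solution : Prop := ∀ (n : Int) (A : Int) (B : Int) (array_a : List Int), Dom_solution n A B array_a → Spec_solution n A B array_a (solution n A B array_a)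

-- ===== LEMMAS AND PROOFS =====

/-- residue class of an integer mod 10, as a natural number < 10 -/
def pvKey (t : Int) : Nat := (t % 10).toNat

/-- the success condition of both programs, expressed on a subset sum -/
def pvCond (A B tot t : Int) : Bool :=
  (PySem.Int.mod t 10 == A && PySem.Int.mod (tot - t) 10 == B) ||
  (PySem.Int.mod t 10 == B && PySem.Int.mod (tot - t) 10 == A)

/-- the success condition on a residue r < 10 (as B tests it) -/
def pvCondR (A B tot : Int) (r : Nat) : Bool :=
  ((r : Int) == A && PySem.Int.mod (tot - (r : Int)) 10 == B) ||
  ((r : Int) == B && PySem.Int.mod (tot - (r : Int)) 10 == A)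

theorem pvMod10 (t : Int) : PySem.Int.mod t 10 = t % 10 :=
  PySem.Int.mod_eq_emod_of_pos (by norm_num)

theorem pvKey_lt (t : Int) : pvKey t < 10 := by
  unfold pvKey; omega

theorem pvKey_cast (t : Int) : ((pvKey t : Nat) : Int) = t % 10 := by
  unfold pvKey; omega

theorem pvCond_eq_condR (A B tot t : Int) : pvCond A B tot t = pvCondR A B tot (pvKey t) := by
  unfold pvCond pvCondR
  rw [pvMod10, pvMod10, pvMod10, pvKey_cast]
  have h1 : (tot - t) % 10 = (tot - t % 10) % 10 := by omega
  rw [h1]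

theorem pvKey_key_sub (a x : Int) : pvKey ((pvKey a : Int) - x) = pvKey (a - x) := by
  unfold pvKey; omega

theorem pvKey_of_lt (r : Nat) (h : r < 10) : pvKey (r : Int) = r := by
  unfold pvKey; omega

/-- PySem.List.combinations is a permutation of Mathlib's sublistsLen -/
theorem pvCombPerm (r : Nat) (xs : List Int) :
    (PySem.List.combinations xs r).Perm (List.sublistsLen r xs) := by
  induction xs generalizing r with
  | nil =>
    cases r with
    | zero => simp [PySem.List.combinations_zero]
    | succ r => simp [PySem.List.combinations_nil_succ]
  | cons x xs ih =>
    cases r with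
    | zero => simp [PySem.List.combinations_zero]
    | succ r =>
      rw [PySem.List.combinations_cons_succ, List.sublistsLen_succ_cons]
      exact (List.perm_append_comm).trans ((ih (r+1)).append ((ih r).map _))

/-- countP over a flatMap is the sum of the per-piece counts -/
theorem pvCountP_flatMap {α β : Type} (L : List α) (g : α → List β) (p : β → Bool) :
    (L.flatMap g).countP p = (L.map (fun a => (g a).countP p)).sum := by
  induction L with
  | nil => simp
  | cons a L ih => simp [List.flatMap_cons, List.countP_append, ih]

/-- summing indicator values equals counting -/
theorem pvSum_ite_one {α : Type} (L : List α) (p : α → Bool) :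
    (L.map (fun s => if p s then (1 : Int) else 0)).sum = (L.countP p : Int) := by
  induction L with
  | nil => simp
  | cons s L ih =>
    by_cases h : p s <;> simp [h, ih] <;> ring

theorem pvGetD_map_range (m : Nat) (f : Nat → Int) (k : Nat) (h : k < m) :
    ((List.range m).map f).getD k 0 = f k := by
  rw [List.getD_eq_getElem?_getD, List.getElem?_map, List.getElem?_range h]
  rfl

/-- list sum over range = Finset sum over range -/
theorem pvSum_range (m : Nat) (f : Nat → Int) :
    ((List.range m).map f).sum = ∑ r ∈ Finset.range m, f r := by
  induction m with
  | zero => simp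
  | succ m ih => rw [List.range_succ, Finset.sum_range_succ, List.map_append, List.sum_append, ih]; simp

/-- the DP step of port B -/
def pvStep (dp : List Int) (x : Int) : List Int :=
  (List.range 10).map (fun r =>
    dp.getD r 0 + dp.getD (PySem.Int.mod ((r : Int) - x) 10).toNat 0)

theorem pvStep_getD (dp : List Int) (x : Int) (k : Nat) (h : k < 10) :
    (pvStep dp x).getD k 0 = dp.getD k 0 + dp.getD (pvKey ((k : Int) - x)) 0 := by
  unfold pvStep
  rw [pvGetD_map_range 10 _ k h, pvMod10]
  rfl

/-- invariant of B's fold: entry r of the dp is a sum of dp-lookups over all sublists -/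
theorem pvDp_inv (xs : List Int) (dp : List Int) (r : Nat) (h : r < 10) :
    (xs.foldl pvStep dp).getD r 0
      = ((List.sublists' xs).map (fun s => dp.getD (pvKey ((r : Int) - s.sum)) 0)).sum := by
  induction xs generalizing dp with
  | nil => simp [pvKey_of_lt r h]
  | cons x xs ih =>
    rw [List.foldl_cons, ih (pvStep dp x)]
    rw [List.sublists'_cons, List.map_append, List.sum_append, List.map_map]
    have hcongr : ((List.sublists' xs).map (fun s => (pvStep dp x).getD (pvKey ((r : Int) - s.sum)) 0))
        = (List.sublists' xs).map (fun s =>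
            dp.getD (pvKey ((r : Int) - s.sum)) 0 + dp.getD (pvKey ((r : Int) - s.sum - x)) 0) := by
      apply List.map_congr_left
      intro s _
      rw [pvStep_getD dp x _ (pvKey_lt _), pvKey_key_sub]
    rw [hcongr, List.sum_map_add]
    have h2 : List.map ((fun s => dp.getD (pvKey ((r : Int) - s.sum)) 0) ∘ List.cons x) xs.sublists'
        = List.map (fun s => dp.getD (pvKey ((r : Int) - s.sum - x)) 0) xs.sublists' := by
      apply List.map_congr_left
      intro s _
      simp only [Function.comp_apply, List.sum_cons]
      congr 2
      ring
    rw [h2]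

/-- dp entry r after the whole fold counts the sublists with sum ≡ r (mod 10) -/
theorem pvDp_count (xs : List Int) (r : Nat) (h : r < 10) :
    (xs.foldl pvStep ((List.range 10).map (fun r => if r = 0 then 1 else 0))).getD r 0
      = ((List.sublists' xs).countP (fun s => pvKey s.sum == r) : Int) := by
  rw [pvDp_inv xs _ r h, ← pvSum_ite_one]
  apply congrArg
  apply List.map_congr_left
  intro s _
  have hk := pvKey_lt ((r : Int) - s.sum)
  rw [pvGetD_map_range 10 _ _ hk]
  have : (pvKey ((r : Int) - s.sum) = 0) ↔ (pvKey s.sum = r) := by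
    unfold pvKey; omega
  by_cases hh : pvKey s.sum = r
  · rw [if_pos (this.mpr hh), if_pos (by simpa using hh)]
  · rw [if_neg (fun c => hh (this.mp c)), if_neg (by simpa using hh)]

/-- partitioning a count by residue class mod 10 -/
theorem pvPartition (A B tot : Int) (L : List (List Int)) :
    ((L.countP (fun s => pvCond A B tot s.sum)) : Int)
      = ∑ r ∈ Finset.range 10,
          (if pvCondR A B tot r then ((L.countP (fun s => pvKey s.sum == r)) : Int) else 0) := by
  induction L with
  | nil => simp
  | cons s L ih =>
    rw [List.countP_cons]
    have hsplit : ∀ r ∈ Finset.range 10,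
        (if pvCondR A B tot r then (((s :: L).countP (fun s => pvKey s.sum == r)) : Int) else 0)
        = (if pvCondR A B tot r then ((L.countP (fun s => pvKey s.sum == r)) : Int) else 0)
          + (if r = pvKey s.sum then (if pvCondR A B tot r then (1 : Int) else 0) else 0) := by
      intro r _
      rw [List.countP_cons]
      by_cases hc : pvCondR A B tot r
      · by_cases he : r = pvKey s.sum
        · subst he; simp [hc]
        · have : (pvKey s.sum == r) = false := by simp [Ne.symm he]
          simp [hc, this, he]
      · simp [hc]
    rw [Finset.sum_congr rfl hsplit, Finset.sum_add_distrib, ← ih]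
    rw [Finset.sum_ite_eq' (Finset.range 10) (pvKey s.sum)
      (fun r => if pvCondR A B tot r then (1 : Int) else 0)]
    rw [if_pos (Finset.mem_range.mpr (pvKey_lt s.sum))]
    rw [pvCond_eq_condR]
    by_cases hc : pvCondR A B tot (pvKey s.sum) <;> simp [hc]

/-- casting a per-piece Nat sum into Int -/
theorem pvCast_sum (l : List Nat) (f : Nat → Nat) :
    (l.map (fun i => ((f i : Nat) : Int))).sum = (((l.map f).sum : Nat) : Int) := by
  induction l with
  | nil => simp
  | cons a l ih => simp [ih]

/-- A's nested loops compute the count of qualifying sublists -/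
theorem pvA_count (A B : Int) (xs : List Int) :
    (PySem.List.pyRange 0 ((xs.length : Int) + 1) 1).foldl (fun acc i =>
      (PySem.List.combinations xs i.toNat).foldl (fun acc2 subset =>
        if (PySem.Int.mod subset.sum 10 == A && PySem.Int.mod (xs.sum - subset.sum) 10 == B) ||
           (PySem.Int.mod subset.sum 10 == B && PySem.Int.mod (xs.sum - subset.sum) 10 == A)
        then acc2 + 1 else acc2) acc) 0
    = ((List.sublists' xs).countP (fun s => pvCond A B xs.sum s.sum) : Int) := by
  have hrange : PySem.List.pyRange 0 ((xs.length : Int) + 1) 1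
      = (List.range (xs.length + 1)).map Int.ofNat := by
    have : ((xs.length : Int) + 1) = ((xs.length + 1 : Nat) : Int) := by push_cast; ring
    rw [this]
    simp only [PySem.List.pyRange]
    norm_num
  rw [hrange, List.foldl_map]
  have hinner : ∀ (acc : Int) (i : Nat),
      (PySem.List.combinations xs (Int.ofNat i).toNat).foldl (fun acc2 subset =>
        if (PySem.Int.mod subset.sum 10 == A && PySem.Int.mod (xs.sum - subset.sum) 10 == B) ||
           (PySem.Int.mod subset.sum 10 == B && PySem.Int.mod (xs.sum - subset.sum) 10 == A)
        then acc2 + 1 else acc2) acc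
      = acc + ((List.sublistsLen i xs).countP (fun s => pvCond A B xs.sum s.sum) : Int) := by
    intro acc i
    exact (PySem.List.foldl_if_add_one
        (fun subset => pvCond A B xs.sum subset.sum) (PySem.List.combinations xs i) acc).trans
      (by rw [(pvCombPerm i xs).countP_eq])
  refine (PySem.List.foldl_congr_mem _ _ _ _ (fun acc i hi => hinner acc i)).trans ?_
  refine (PySem.List.foldl_add _
    (fun i => ((List.sublistsLen i xs).countP (fun s => pvCond A B xs.sum s.sum) : Int)) _).trans ?_
  rw [zero_add, pvCast_sum]
  rw [← pvCountP_flatMap (List.range (xs.length + 1)) (fun i => List.sublistsLen i xs)]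
  rw [(List.range_bind_sublistsLen_perm xs).countP_eq]

/-- B's final loop over the residues equals the same count -/
theorem pvB_count (A B tot : Int) (xs : List Int) :
    (List.range 10).foldl (fun (acc : Int) (r : Nat) =>
      if ((r : Int) == A && PySem.Int.mod (tot - (r : Int)) 10 == B) ||
         ((r : Int) == B && PySem.Int.mod (tot - (r : Int)) 10 == A)
      then acc + (xs.foldl pvStep ((List.range 10).map (fun r => if r = 0 then 1 else 0))).getD r 0
      else acc) 0
    = ((List.sublists' xs).countP (fun s => pvCond A B tot s.sum) : Int) := by
  have hstep : ∀ (acc : Int) (r : Nat), r ∈ List.range 10 →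
      (if ((r : Int) == A && PySem.Int.mod (tot - (r : Int)) 10 == B) ||
          ((r : Int) == B && PySem.Int.mod (tot - (r : Int)) 10 == A)
       then acc + (xs.foldl pvStep ((List.range 10).map (fun r => if r = 0 then 1 else 0))).getD r 0
       else acc)
      = acc + (if pvCondR A B tot r
          then ((List.sublists' xs).countP (fun s => pvKey s.sum == r) : Int) else 0) := by
    intro acc r hr
    have hlt : r < 10 := List.mem_range.mp hr
    unfold pvCondR
    split_ifs with hc
    · rw [pvDp_count xs r hlt]
    · ring
  refine (PySem.List.foldl_congr_mem _ _ _ _ hstep).trans ?_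
  refine (PySem.List.foldl_add _ (fun r => if pvCondR A B tot r
      then ((List.sublists' xs).countP (fun s => pvKey s.sum == r) : Int) else 0) _).trans ?_
  rw [zero_add, pvSum_range, ← pvPartition]

theorem pvMain (n A B : Int) (xs : List Int) : solution n A B xs = solution_alt n A B xs := by
  unfold solution solution_alt
  simp only []
  rw [pvA_count A B xs, ← pvB_count A B xs.sum xs]
  rfl

-- ===== VERDICT (by name: the statement is the Claim_ definition above) =====
theorem solution_spec : Claim_equal_solution := by
  intro n A B array_a _
  unfold Spec_solution
  exact pvMain n A B array_a
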